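-- pv_equiv track=rewrite | github.com/daniel-reich/ubiquitous-fiesta | srEFhCNueikMKs3oT_20.py | consecutive_sum
-- ===== SOURCE A (Python) =====
-- def consecutive_sum(n):
--
--   Failsafe = 0;
--   Start = 1
--   Addition = 1
--   Total = 0
--
--   while (Failsafe == 0):
--
--     while (Total < n):
--       Total += Addition
--       Addition += 1
--
--     if (Total == n):
--       return True
--     else:
--       Total = 0
--       Start += 1
--       Addition = Start
--
--     if (Start == n):
--       Failsafe += 1
--
--   return False
-- ===== SOURCE B (Python) =====
-- def consecutive_sum(n):
--     # strip factors of two: n is a sum of consecutive integers iff it is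
--     # not a power of two (with n <= 1 handled as the original does)
--     if n <= 1:
--         return True
--     while n % 2 == 0:
--         n //= 2
--     return n != 1
-- ===== Notes on version B (the rewrite author's own statement) =====
-- stated objective: faster
-- what changed: Replaced the doubly-nested search over all start values by the power-of-two characterisation: strip factors of 2 and test whether the odd part is 1.
import Mathlib
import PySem

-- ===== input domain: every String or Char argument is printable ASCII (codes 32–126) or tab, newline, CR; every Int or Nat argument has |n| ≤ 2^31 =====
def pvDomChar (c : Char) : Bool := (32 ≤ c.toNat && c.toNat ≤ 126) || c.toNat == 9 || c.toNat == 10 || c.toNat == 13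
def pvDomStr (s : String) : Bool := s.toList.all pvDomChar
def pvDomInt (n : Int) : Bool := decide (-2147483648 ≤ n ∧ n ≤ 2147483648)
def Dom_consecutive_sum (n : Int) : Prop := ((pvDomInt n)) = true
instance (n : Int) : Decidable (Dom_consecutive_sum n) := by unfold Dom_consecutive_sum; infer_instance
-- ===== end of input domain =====

-- B replaces A's nested search over all start values by stripping factors of 2
-- (n is such a sum iff n ≤ 1 or n is not a power of two); objective: faster.

-- ===== PORT A =====
-- inner 'while Total < n' loop; fuel only makes the recursion total
def csInner (n Total Addition : Int) : Nat → Int × Int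
  | 0 => (Total, Addition)
  | f + 1 =>
    if Total < n then csInner n (Total + Addition) (Addition + 1) f
    else (Total, Addition)

-- outer 'while Failsafe == 0' loop; fuel only makes the recursion total
def csOuter (n Start : Int) : Nat → Bool
  | 0 => false
  | f + 1 =>
    if (csInner n 0 Start (n.toNat + 1)).1 = n then true
    else if Start + 1 = n then false
    else csOuter n (Start + 1) f

def consecutive_sum (n : Int) : Bool := csOuter n 1 (n.toNat + 1)

-- ===== PORT B =====
-- 'while n % 2 == 0: n //= 2'; fuel only makes the recursion total
def oddPart (n : Int) : Nat → Int
  | 0 => n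
  | f + 1 => if n % 2 = 0 ∧ 1 ≤ n then oddPart (n / 2) f else n

def consecutive_sum_alt (n : Int) : Bool :=
  if n ≤ 1 then true else decide (oddPart n n.toNat ≠ 1)

-- ===== PRECONDITION & SPEC =====
-- Pre_ excludes negative n, on which the Python A never terminates (the outer
-- loop's 'Start == n' exit can never fire for negative n).
def Pre_consecutive_sum (n : Int) : Prop := 0 ≤ n
instance (n : Int) : Decidable (Pre_consecutive_sum n) := by unfold Pre_consecutive_sum; infer_instance
def pvWitness_consecutive_sum : Int := (6)

def Spec_consecutive_sum (n : Int) (out : Bool) : Prop := out = consecutive_sum_alt n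
instance (n : Int) (out : Bool) : Decidable (Spec_consecutive_sum n out) := by unfold Spec_consecutive_sum; infer_instance

-- ===== CLAIM (what is proved, stated in full; the proofs are below) =====
def Claim_equal_consecutive_sum : Prop := ∀ (n : Int), Dom_consecutive_sum n → Pre_consecutive_sum n → Spec_consecutive_sum n (consecutive_sum n)

-- ===== LEMMAS AND PROOFS =====

-- n is a sum of at least two consecutive positive integers
def RepCS (n : Int) : Prop := ∃ s t : Int, 1 ≤ s ∧ s < t ∧ 2 * n = (s + t) * (t - s + 1)

-- n is a power of two
def IsPow2 (n : Int) : Prop := ∃ k : Nat, n = 2 ^ k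

lemma inner_sound (n : Int) : ∀ (f : Nat) (T A : Int),
    (csInner n T A f).1 = n →
    n = T ∨ ∃ t : Int, A ≤ t ∧ 2 * n = 2 * T + (A + t) * (t - A + 1) := by
  intro f
  induction f with
  | zero => intro T A h; left; simpa [csInner] using h.symm
  | succ f ih =>
    intro T A h
    by_cases hlt : T < n
    · simp only [csInner, if_pos hlt] at h
      rcases ih _ _ h with h0 | ⟨t, ht, he⟩
      · right; exact ⟨A, le_refl _, by linear_combination 2 * h0⟩
      · right; exact ⟨t, by omega, by linear_combination he⟩
    · simp only [csInner, if_neg hlt] at h; left; exact h.symm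

lemma inner_complete (n : Int) : ∀ (f : Nat) (T A : Int),
    1 ≤ A → (n - T).toNat ≤ f →
    (∃ t : Int, A - 1 ≤ t ∧ 2 * n = 2 * T + (A + t) * (t - A + 1)) →
    (csInner n T A f).1 = n := by
  intro f
  induction f with
  | zero =>
    rintro T A hA hf ⟨t, ht, he⟩
    have hnn : 0 ≤ (A + t) * (t - A + 1) := mul_nonneg (by omega) (by omega)
    have h1 : 2 * T ≤ 2 * n := by linarith
    have hTn : T = n := by omega
    simp [csInner, hTn]
  | succ f ih =>
    rintro T A hA hf ⟨t, ht, he⟩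
    have hnn : 0 ≤ (A + t) * (t - A + 1) := mul_nonneg (by omega) (by omega)
    have hTn : T ≤ n := by linarith
    by_cases hlt : T < n
    · simp only [csInner, if_pos hlt]
      have htA : A ≤ t := by
        by_contra hc
        have ht' : t = A - 1 := by omega
        subst ht'
        have : 2 * n = 2 * T := by linear_combination he
        omega
      exact ih _ _ (by omega) (by omega) ⟨t, by omega, by linear_combination he⟩
    · simp only [csInner, if_neg hlt]; omega

lemma outer_sound (n : Int) : ∀ (f : Nat) (S : Int), csOuter n S f = true →
    ∃ s : Int, S ≤ s ∧ (s = S ∨ s ≠ n) ∧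
      (n = 0 ∨ ∃ t : Int, s ≤ t ∧ 2 * n = (s + t) * (t - s + 1)) := by
  intro f
  induction f with
  | zero => intro S h; simp [csOuter] at h
  | succ f ih =>
    intro S h
    by_cases h1 : (csInner n 0 S (n.toNat + 1)).1 = n
    · refine ⟨S, le_refl _, Or.inl rfl, ?_⟩
      rcases inner_sound n _ _ _ h1 with h0 | ⟨t, ht, he⟩
      · left; omega
      · right; exact ⟨t, ht, by linear_combination he⟩
    · by_cases h2 : S + 1 = n
      · simp [csOuter, h1, h2] at h
      · simp only [csOuter, if_neg h1, if_neg h2] at h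
        obtain ⟨s, hs1, hs2, hs3⟩ := ih _ h
        refine ⟨s, by omega, Or.inr ?_, hs3⟩
        rcases hs2 with h | h <;> omega

lemma outer_complete (n s t : Int) (hs : 1 ≤ s) (hst : s < t)
    (he : 2 * n = (s + t) * (t - s + 1)) :
    ∀ (f : Nat) (S : Int), 1 ≤ S → S ≤ s → (s - S).toNat < f →
    csOuter n S f = true := by
  have hn : 2 * s + 1 ≤ n := by nlinarith
  intro f
  induction f with
  | zero => intro S _ _ hf; omega
  | succ f ih =>
    intro S hS1 hSs hf
    by_cases h1 : (csInner n 0 S (n.toNat + 1)).1 = n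
    · simp only [csOuter, if_pos h1]
    · have hne : S ≠ s := by
        intro hEq
        subst hEq
        exact h1 (inner_complete n _ 0 S (by omega) (by omega)
          ⟨t, by omega, by linear_combination he⟩)
      have h2 : S + 1 ≠ n := by omega
      simp only [csOuter, if_neg h1, if_neg h2]
      exact ih _ (by omega) (by omega) (by omega)

lemma oddPart_decomp : ∀ (f : Nat) (n : Int), 1 ≤ n → n ≤ 2 ^ f →
    ∃ v : Nat, n = 2 ^ v * oddPart n f ∧ oddPart n f % 2 = 1 := by
  intro f
  induction f with
  | zero =>
    intro n h1 h2
    have h2' : n ≤ 1 := by simpa using h2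
    have hn1 : n = 1 := by omega
    subst hn1
    exact ⟨0, by simp [oddPart], by simp [oddPart]⟩
  | succ f ih =>
    intro n h1 h2
    have hpow : (2:Int) ^ (f + 1) = 2 * 2 ^ f := by ring
    rw [hpow] at h2
    by_cases hg : n % 2 = 0 ∧ 1 ≤ n
    · have hhalf : n / 2 ≤ 2 ^ f := by
        have h3 := Int.ediv_le_ediv (by norm_num : (0:Int) < 2) h2
        rwa [Int.mul_ediv_cancel_left _ (by norm_num)] at h3
      have hn2 : 2 ≤ n := by omega
      obtain ⟨v, hv, hodd⟩ := ih (n / 2) (by omega) hhalf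
      refine ⟨v + 1, ?_, ?_⟩
      · simp only [oddPart, if_pos hg]
        calc n = 2 * (n / 2) := by omega
          _ = 2 * (2 ^ v * oddPart (n / 2) f) := by rw [← hv]
          _ = 2 ^ (v + 1) * oddPart (n / 2) f := by ring
      · simp only [oddPart, if_pos hg]; exact hodd
    · refine ⟨0, ?_, ?_⟩ <;> simp only [oddPart, if_neg hg]
      · ring
      · omega

lemma odd_dvd_two_pow {m : Int} (hm : 1 ≤ m) (hodd : m % 2 = 1) {k : Nat}
    (hdvd : m ∣ (2:Int) ^ k) : m = 1 := by
  have hm' : m = (m.toNat : Int) := by omega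
  have hdvd' : (m.toNat : Int) ∣ ((2 ^ k : Nat) : Int) := by
    rw [← hm']; push_cast; exact hdvd
  have hnat : m.toNat ∣ 2 ^ k := Int.ofNat_dvd.mp hdvd'
  obtain ⟨i, _, hi⟩ := (Nat.dvd_prime_pow Nat.prime_two).mp hnat
  cases i with
  | zero => omega
  | succ i =>
    exfalso
    have : m.toNat % 2 = 0 := by
      rw [hi, pow_succ, Nat.mul_mod_left]
    omega

lemma rep_not_p2 {n : Int} (h : RepCS n) : ¬ IsPow2 n := by
  rintro ⟨k, hk⟩
  obtain ⟨s, t, hs, hst, he⟩ := h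
  have h2n : (s + t) * (t - s + 1) = 2 ^ (k + 1) := by
    linear_combination -he + 2 * hk
  by_cases hpar : (s + t) % 2 = 1
  · have : s + t = 1 := odd_dvd_two_pow (by omega) hpar ⟨t - s + 1, h2n.symm⟩
    omega
  · have hpar' : (t - s + 1) % 2 = 1 := by omega
    have : t - s + 1 = 1 := odd_dvd_two_pow (k := k + 1) (by omega) hpar'
      ⟨s + t, by linear_combination -h2n⟩
    omega

lemma int_le_two_pow_toNat {n : Int} (h : 0 ≤ n) : n ≤ 2 ^ n.toNat := by
  have h1 : n.toNat < 2 ^ n.toNat := Nat.lt_two_pow_self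
  have h2 : ((n.toNat : Int)) < ((2 ^ n.toNat : Nat) : Int) := by exact_mod_cast h1
  push_cast at h2
  omega

lemma not_p2_rep {n : Int} (hn : 2 ≤ n) (h : ¬ IsPow2 n) : RepCS n := by
  obtain ⟨v, hv, hodd⟩ := oddPart_decomp n.toNat n (by omega) (int_le_two_pow_toNat (by omega))
  have hqpos : (0:Int) < 2 ^ v := pow_pos (by norm_num) v
  have hmpos : 1 ≤ oddPart n n.toNat := by nlinarith
  have hm1 : oddPart n n.toNat ≠ 1 := by
    intro h1
    exact h ⟨v, by rw [hv, h1, mul_one]⟩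
  have hm3 : 3 ≤ oddPart n n.toNat := by omega
  obtain ⟨u, hu⟩ : ∃ u : Int, oddPart n n.toNat = 2 * u + 1 := ⟨oddPart n n.toNat / 2, by omega⟩
  have hu1 : 1 ≤ u := by omega
  by_cases hcase : u + 1 ≤ (2:Int) ^ v
  · exact ⟨2 ^ v - u, 2 ^ v + u, by linarith, by linarith,
      by linear_combination 2 * hv + (2 * (2:Int) ^ v) * hu⟩
  · have hqu : (2:Int) ^ v ≤ u := by linarith
    exact ⟨u + 1 - 2 ^ v, u + 2 ^ v, by linarith, by linarith,
      by linear_combination 2 * hv + (2 * (2:Int) ^ v) * hu⟩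

lemma p2_oddPart_eq_one {n : Int} (hn : 1 ≤ n) (h : IsPow2 n) :
    oddPart n n.toNat = 1 := by
  obtain ⟨v, hv, hodd⟩ := oddPart_decomp n.toNat n hn (int_le_two_pow_toNat (by omega))
  obtain ⟨k, hk⟩ := h
  have hqpos : (0:Int) < 2 ^ v := pow_pos (by norm_num) v
  have hmpos : 1 ≤ oddPart n n.toNat := by nlinarith
  exact odd_dvd_two_pow (k := k) hmpos hodd ⟨2 ^ v, by linear_combination hv - hk⟩

lemma a_true_iff_rep {n : Int} (hn : 2 ≤ n) : consecutive_sum n = true ↔ RepCS n := by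
  constructor
  · intro h
    obtain ⟨s, hs1, hs2, hs3⟩ := outer_sound n _ _ h
    rcases hs3 with h0 | ⟨t, hst, he⟩
    · omega
    · refine ⟨s, t, by omega, ?_, he⟩
      by_contra hc
      have hts : t = s := by omega
      subst hts
      have : 2 * n = 2 * t := by linear_combination he
      rcases hs2 with h | h <;> omega
  · rintro ⟨s, t, hs, hst, he⟩
    have hn2 : 2 * s + 1 ≤ n := by nlinarith
    exact outer_complete n s t hs hst he _ 1 (le_refl _) (by omega) (by omega)

-- ===== VERDICT (by name: the statement is the Claim_ definition above) =====
theorem consecutive_sum_spec : Claim_equal_consecutive_sum := by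
  unfold Claim_equal_consecutive_sum
  intro n _ hPre
  unfold Spec_consecutive_sum
  unfold Pre_consecutive_sum at hPre
  by_cases hsmall : n ≤ 1
  · interval_cases n <;> decide
  · have hn : 2 ≤ n := by omega
    have hB : consecutive_sum_alt n = decide (oddPart n n.toNat ≠ 1) := by
      unfold consecutive_sum_alt
      rw [if_neg (by omega)]
    rw [hB]
    by_cases hp : IsPow2 n
    · have h1 : oddPart n n.toNat = 1 := p2_oddPart_eq_one (by omega) hp
      have h2 : consecutive_sum n = false := by
        cases hcs : consecutive_sum n
        · rfl
        · exact absurd hp (rep_not_p2 ((a_true_iff_rep hn).mp hcs))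
      rw [h2, h1]
      simp
    · have h1 : oddPart n n.toNat ≠ 1 := by
        intro h1
        obtain ⟨v, hv, _⟩ := oddPart_decomp n.toNat n (by omega) (int_le_two_pow_toNat (by omega))
        exact hp ⟨v, by rw [hv, h1, mul_one]⟩
      have h2 : consecutive_sum n = true := (a_true_iff_rep hn).mpr (not_p2_rep hn hp)
      rw [h2]
      simp [h1]
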